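-- pv_equiv track=rewrite | github.com/bencoleman24/AmazonReviewInsights | product_report_generator.py | parse_pro_con_bullet_points
-- ===== SOURCE A (Python) =====
-- def parse_pro_con_bullet_points(text, max_items=15):
--     pro_con_dict = {'pro_takeaways': [], 'con_takeaways': []}
--
--     # Add items to their respective lists, filtering out those longer than 10 words
--     for line in text.split('\n'):
--         line = line.strip()
--         if line.startswith('PRO') or line.startswith('CON'):
--             items = [item.strip() for item in line[4:].split(',') if item]
--             filtered_items = [item for item in items if len(item.split()) <= 10]
--
--             if line.startswith('PRO'):
--                 pro_con_dict['pro_takeaways'].extend(filtered_items)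
--             elif line.startswith('CON'):
--                 pro_con_dict['con_takeaways'].extend(filtered_items)
--
--     # Next, trim the lists to ensure the total count does not exceed max_items
--     total_items = len(pro_con_dict['pro_takeaways']) + len(pro_con_dict['con_takeaways'])
--     while total_items > max_items:
--         if len(pro_con_dict['pro_takeaways']) > len(pro_con_dict['con_takeaways']):
--             pro_con_dict['pro_takeaways'].pop()
--         else:
--             pro_con_dict['con_takeaways'].pop()
--         total_items -= 1
--
--     return pro_con_dict
-- ===== SOURCE B (Python) =====
-- def parse_pro_con_bullet_points(text, max_items=15):
--     def takeaways(line):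
--         return [s for s in (raw.strip() for raw in line[4:].split(',') if raw)
--                 if len(s.split()) <= 10]
--     pros, cons = [], []
--     for raw_line in text.split('\n'):
--         line = raw_line.strip()
--         if line.startswith('PRO'):
--             pros += takeaways(line)
--         elif line.startswith('CON'):
--             cons += takeaways(line)
--     p, c = len(pros), len(cons)
--     if p + c > max_items:
--         hi = max_items - max_items // 2          # ceil(max_items / 2)
--         keep_pro = max(max_items - c, min(p, hi))
--         pros, cons = pros[:keep_pro], cons[:max_items - keep_pro]
--     return {'pro_takeaways': pros, 'con_takeaways': cons}
-- ===== Notes on version B (the rewrite author's own statement) =====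
-- stated objective: simpler
-- what changed: The while-loop that repeatedly pops from the longer list is replaced by a closed-form computation of how many pro items to keep (ceil(max_items/2) target clamped by the two lengths), followed by two slices; the parsing pass is kept.
import Mathlib
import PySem

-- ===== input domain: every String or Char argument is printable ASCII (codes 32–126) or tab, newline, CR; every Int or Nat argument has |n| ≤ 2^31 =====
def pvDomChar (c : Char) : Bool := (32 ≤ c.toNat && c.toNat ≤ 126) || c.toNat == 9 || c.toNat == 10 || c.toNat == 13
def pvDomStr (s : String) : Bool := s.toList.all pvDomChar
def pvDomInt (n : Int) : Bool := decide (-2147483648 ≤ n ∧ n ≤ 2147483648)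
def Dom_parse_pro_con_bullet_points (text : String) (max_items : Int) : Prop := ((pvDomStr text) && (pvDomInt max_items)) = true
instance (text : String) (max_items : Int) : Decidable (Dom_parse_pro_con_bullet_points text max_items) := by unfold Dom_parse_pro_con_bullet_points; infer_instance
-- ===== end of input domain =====

-- B replaces A's while-pop trimming loop with a closed-form computation of how many pro items to
-- keep (simpler decomposition; the parsing pass is the same). Equivalence is proved for max_items ≥ 0;
-- for max_items < 0 the Python A always raises IndexError (pop from an empty list).

-- ===== PORT A =====
-- The dict with the two fixed keys 'pro_takeaways'/'con_takeaways' is ported as a pair of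
-- accumulators and rebuilt as the association list at the return.
def pvStepA (st : List String × List String) (rawline : String) : List String × List String :=
  let line := PySem.Str.strip rawline
  if PySem.Str.startswith line "PRO" || PySem.Str.startswith line "CON" then
    -- sep "," is a nonempty literal, so split? is always `some`
    let items := (((PySem.Str.split? (PySem.Str.slice line (some 4) none) ",").getD []).filter
        (fun item => item != "")).map PySem.Str.strip
    let filtered := items.filter (fun item => (PySem.Str.split₀ item).length ≤ 10)
    if PySem.Str.startswith line "PRO" then (st.1 ++ filtered, st.2)
    else if PySem.Str.startswith line "CON" then (st.1, st.2 ++ filtered)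
    else st
  else st

-- the while-pop loop; list.pop() = dropLast.  Fuel = the initial total: each iteration lowers
-- total by 1 and the loop stops at total ≤ max_items, so for 0 ≤ max_items (Pre_) this fuel is
-- exact; for max_items < 0 the Python raises IndexError (excluded by Pre_).
def pvTrimA : Nat → Int → Int → List String → List String → List String × List String
  | 0, _, _, pro, con => (pro, con)
  | fuel+1, total, m, pro, con =>
    if m < total then
      if (con.length : Int) < pro.length then pvTrimA fuel (total - 1) m pro.dropLast con
      else pvTrimA fuel (total - 1) m pro con.dropLast
    else (pro, con)

def parse_pro_con_bullet_points (text : String) (max_items : Int) : List (String × List String) :=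
  let pc := ((PySem.Str.split? text "\n").getD []).foldl pvStepA ([], [])
  let total : Int := (pc.1.length : Int) + (pc.2.length : Int)
  let res := pvTrimA (pc.1.length + pc.2.length) total max_items pc.1 pc.2
  [("pro_takeaways", res.1), ("con_takeaways", res.2)]

-- ===== PORT B =====
def pvTakeawaysB (line : String) : List String :=
  ((((PySem.Str.split? (PySem.Str.slice line (some 4) none) ",").getD []).filter
      (fun raw => raw != "")).map PySem.Str.strip).filter
    (fun s => (PySem.Str.split₀ s).length ≤ 10)

def pvStepB (st : List String × List String) (raw_line : String) : List String × List String :=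
  let line := PySem.Str.strip raw_line
  if PySem.Str.startswith line "PRO" then (st.1 ++ pvTakeawaysB line, st.2)
  else if PySem.Str.startswith line "CON" then (st.1, st.2 ++ pvTakeawaysB line)
  else st

def parse_pro_con_bullet_points_alt (text : String) (max_items : Int) : List (String × List String) :=
  let pc := ((PySem.Str.split? text "\n").getD []).foldl pvStepB ([], [])
  let p : Int := pc.1.length
  let c : Int := pc.2.length
  if max_items < p + c then
    let hi := max_items - PySem.Int.floordiv max_items 2
    let keep := max (max_items - c) (min p hi)
    [("pro_takeaways", PySem.List.slice pc.1 none (some keep)),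
     ("con_takeaways", PySem.List.slice pc.2 none (some (max_items - keep)))]
  else
    [("pro_takeaways", pc.1), ("con_takeaways", pc.2)]

-- ===== PRECONDITION & SPEC =====
-- Pre_ excludes exactly the inputs where A raises: for max_items < 0 the while loop pops from an
-- empty list (IndexError); for 0 ≤ max_items A always returns.
def Pre_parse_pro_con_bullet_points (text : String) (max_items : Int) : Prop := 0 ≤ max_items
instance (text : String) (max_items : Int) : Decidable (Pre_parse_pro_con_bullet_points text max_items) := by unfold Pre_parse_pro_con_bullet_points; infer_instance

def pvWitness_parse_pro_con_bullet_points : String × Int := ("PRO: very good, solid\nCON: pricey", 1)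

def Spec_parse_pro_con_bullet_points (text : String) (max_items : Int) (out : List (String × List String)) : Prop := out = parse_pro_con_bullet_points_alt text max_items
instance (text : String) (max_items : Int) (out : List (String × List String)) : Decidable (Spec_parse_pro_con_bullet_points text max_items out) := by unfold Spec_parse_pro_con_bullet_points; infer_instance

-- ===== CLAIM (what is proved, stated in full; the proofs are below) =====
def Claim_equal_parse_pro_con_bullet_points : Prop := ∀ (text : String) (max_items : Int), Dom_parse_pro_con_bullet_points text max_items → Pre_parse_pro_con_bullet_points text max_items → Spec_parse_pro_con_bullet_points text max_items (parse_pro_con_bullet_points text max_items)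

-- ===== LEMMAS AND PROOFS =====

-- the number of pro items B keeps, as a function of the two lengths
def pvKeep (p c m : Int) : Int := max (m - c) (min p (m - PySem.Int.floordiv m 2))

theorem pvStep_eq : pvStepA = pvStepB := by
  funext st raw
  unfold pvStepA pvStepB pvTakeawaysB
  cases hP : PySem.Str.startswith (PySem.Str.strip raw) "PRO" <;>
    cases hC : PySem.Str.startswith (PySem.Str.strip raw) "CON" <;>
      simp only [hP, hC, Bool.false_or, Bool.true_or, Bool.or_self, ite_true] <;> rfl

theorem pvTrim_closed (m : Int) (hm : 0 ≤ m) :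
    ∀ (fuel : Nat) (pro con : List String),
      (pro.length : Int) + con.length ≤ m + fuel →
      pvTrimA fuel ((pro.length : Int) + con.length) m pro con =
        if m < (pro.length : Int) + con.length then
          (pro.take (pvKeep pro.length con.length m).toNat,
           con.take (m - pvKeep pro.length con.length m).toNat)
        else (pro, con) := by
  have hdm := PySem.Int.floordiv_mul_add_mod m 2
  have hr0 := PySem.Int.mod_nonneg m (by norm_num : (0:Int) < 2)
  have hr1 := PySem.Int.mod_lt m (by norm_num : (0:Int) < 2)
  intro fuel
  induction fuel with
  | zero =>
    intro pro con hf
    simp only [pvTrimA]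
    rw [if_neg (by omega)]
  | succ n ih =>
    intro pro con hf
    simp only [pvTrimA]
    by_cases h : m < (pro.length : Int) + con.length
    · rw [if_pos h]
      by_cases hp : (con.length : Int) < pro.length
      · -- pop from pro
        rw [if_pos hp]
        have hpro : pro.length ≠ 0 := by omega
        have hdl : (pro.dropLast.length : Int) = (pro.length : Int) - 1 := by
          simp [List.length_dropLast]; omega
        have harg : (pro.length : Int) + con.length - 1
            = (pro.dropLast.length : Int) + con.length := by omega
        rw [harg, ih pro.dropLast con (by omega)]
        -- arithmetic facts about the keep count
        have hkeep : pvKeep pro.dropLast.length con.length m = pvKeep pro.length con.length m := by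
          unfold pvKeep; rw [hdl]; omega
        by_cases h2 : m < (pro.dropLast.length : Int) + con.length
        · rw [if_pos h2, hkeep]
          have hle : (pvKeep pro.length con.length m).toNat ≤ pro.length - 1 := by
            unfold pvKeep; omega
          rw [List.dropLast_eq_take, List.take_take, Nat.min_eq_left (by omega), if_pos h]
        · rw [if_neg h2]
          -- here m = pro.length + con.length - 1
          have hK : pvKeep pro.length con.length m = (pro.length : Int) - 1 := by
            unfold pvKeep; omega
          rw [hK, if_pos h]
          have e1 : ((pro.length : Int) - 1).toNat = pro.length - 1 := by omega
          have e2 : (m - ((pro.length : Int) - 1)).toNat = con.length := by omega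
          rw [e1, e2, ← List.dropLast_eq_take, List.take_length]
      · -- pop from con
        rw [if_neg hp]
        have hcon : con.length ≠ 0 := by omega
        have hdl : (con.dropLast.length : Int) = (con.length : Int) - 1 := by
          simp [List.length_dropLast]; omega
        have harg : (pro.length : Int) + con.length - 1
            = (pro.length : Int) + con.dropLast.length := by omega
        rw [harg, ih pro con.dropLast (by omega)]
        have hkeep : pvKeep pro.length con.dropLast.length m = pvKeep pro.length con.length m := by
          unfold pvKeep; rw [hdl]; omega
        by_cases h2 : m < (pro.length : Int) + con.dropLast.length
        · rw [if_pos h2, hkeep]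
          have hle : (m - pvKeep pro.length con.length m).toNat ≤ con.length - 1 := by
            unfold pvKeep; omega
          rw [List.dropLast_eq_take, List.take_take, Nat.min_eq_left (by omega), if_pos h]
        · rw [if_neg h2]
          -- here m = pro.length + con.length - 1 and pro.length ≤ con.length
          have hK : pvKeep pro.length con.length m = (pro.length : Int) := by
            unfold pvKeep; omega
          rw [hK, if_pos h]
          have e1 : ((pro.length : Int)).toNat = pro.length := by omega
          have e2 : (m - (pro.length : Int)).toNat = con.length - 1 := by omega
          rw [e1, e2, ← List.dropLast_eq_take, List.take_length]
    · rw [if_neg h, if_neg h]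

theorem parse_pro_con_bullet_points_spec : Claim_equal_parse_pro_con_bullet_points := by
  intro text m _hdom hpre
  unfold Spec_parse_pro_con_bullet_points
  unfold Pre_parse_pro_con_bullet_points at hpre
  show parse_pro_con_bullet_points text m = parse_pro_con_bullet_points_alt text m
  simp only [parse_pro_con_bullet_points, parse_pro_con_bullet_points_alt, pvStep_eq]
  set pc := ((PySem.Str.split? text "\n").getD []).foldl pvStepB ([], []) with hpc
  have hdm := PySem.Int.floordiv_mul_add_mod m 2
  have hr0 := PySem.Int.mod_nonneg m (by norm_num : (0:Int) < 2)
  have hr1 := PySem.Int.mod_lt m (by norm_num : (0:Int) < 2)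
  have hfuel : (pc.1.length : Int) + pc.2.length ≤ m + (pc.1.length + pc.2.length : Nat) := by
    push_cast; omega
  have htrim := pvTrim_closed m hpre (pc.1.length + pc.2.length) pc.1 pc.2 hfuel
  rw [htrim]
  by_cases h : m < (pc.1.length : Int) + pc.2.length
  · rw [if_pos h, if_pos h]
    have hK0 : 0 ≤ max (m - (pc.2.length : Int)) (min (pc.1.length : Int) (m - PySem.Int.floordiv m 2)) := by omega
    have hK1 : 0 ≤ m - max (m - (pc.2.length : Int)) (min (pc.1.length : Int) (m - PySem.Int.floordiv m 2)) := by omega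
    rw [PySem.List.slice_to pc.1 hK0, PySem.List.slice_to pc.2 hK1]
    simp only [pvKeep]
  · rw [if_neg h, if_neg h]
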